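-- pv_equiv track=rewrite | github.com/abednego1979/tipster2 | source/config.py | getNamebyStock_configfile
-- ===== SOURCE A (Python) =====
-- stockList={\
--     'Bank':[["601398.ss", "工商银行"],["601939.ss", "建设银行"],["601288.ss", "农业银行"],["601988.ss", "中国银行"],["600036.ss", "招商银行"],["600016.ss", "民生银行"],["600000.ss", "浦发银行"],["601328.ss", "交通银行"],["601818.ss", "光大银行"],["601169.ss", "北京银行"],["601998.ss", "中信银行"],["601166.ss", "兴业银行"],["600015.ss", "华夏银行"],["601229.ss", "上海银行"]],\
--     'Petroleum':[["601857.ss", "中国石油"],["600028.ss", "中国石化"],["601808.ss", "中海油服"]]\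
--            }
--
-- def getNamebyStock_configfile(No):
--     temp_stockList=[]
--     temp_stockName=[]
--     for kType in stockList.keys():
--         temp_stockList+=[item[0] for item in stockList[kType]]
--         temp_stockName+=[item[1] for item in stockList[kType]]
--
--     try:
--         return temp_stockName[temp_stockList.index(No)]
--     except:
--         return "Unknow_Stock_Name.ss"
-- ===== SOURCE B (Python) =====
-- stockList={\
--     'Bank':[["601398.ss", "工商银行"],["601939.ss", "建设银行"],["601288.ss", "农业银行"],["601988.ss", "中国银行"],["600036.ss", "招商银行"],["600016.ss", "民生银行"],["600000.ss", "浦发银行"],["601328.ss", "交通银行"],["601818.ss", "光大银行"],["601169.ss", "北京银行"],["601998.ss", "中信银行"],["601166.ss", "兴业银行"],["600015.ss", "华夏银行"],["601229.ss", "上海银行"]],\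
--     'Petroleum':[["601857.ss", "中国石油"],["600028.ss", "中国石化"],["601808.ss", "中海油服"]]\
--            }
--
-- def getNamebyStock_configfile(No):
--     for pairs in stockList.values():
--         for code, name in pairs:
--             if code == No:
--                 return name
--     return "Unknow_Stock_Name.ss"
-- ===== Notes on version B (the rewrite author's own statement) =====
-- stated objective: simpler
-- what changed: Drops the two flattened parallel lists and the try/except index lookup; iterates the nested stockList directly and returns the name on the first code match, with the sentinel as the plain fallback.
import Mathlib
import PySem

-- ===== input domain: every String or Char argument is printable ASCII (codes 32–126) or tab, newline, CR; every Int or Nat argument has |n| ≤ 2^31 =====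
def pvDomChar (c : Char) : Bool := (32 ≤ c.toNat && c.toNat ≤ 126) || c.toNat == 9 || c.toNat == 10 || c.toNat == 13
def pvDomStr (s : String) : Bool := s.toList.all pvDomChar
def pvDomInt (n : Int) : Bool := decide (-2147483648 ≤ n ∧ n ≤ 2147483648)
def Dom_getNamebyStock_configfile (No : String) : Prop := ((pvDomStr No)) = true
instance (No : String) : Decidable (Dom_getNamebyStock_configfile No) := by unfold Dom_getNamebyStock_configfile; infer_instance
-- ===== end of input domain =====

-- B iterates the nested stockList directly and returns on the first match; A flattens into two parallel lists and uses index with a try/except sentinel.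

-- the module-level constant stockList (a dict of category -> list of [code, name] pairs)
def stockListConst : List (String × List (String × String)) :=
  [("Bank", [("601398.ss", "工商银行"), ("601939.ss", "建设银行"), ("601288.ss", "农业银行"),
             ("601988.ss", "中国银行"), ("600036.ss", "招商银行"), ("600016.ss", "民生银行"),
             ("600000.ss", "浦发银行"), ("601328.ss", "交通银行"), ("601818.ss", "光大银行"),
             ("601169.ss", "北京银行"), ("601998.ss", "中信银行"), ("601166.ss", "兴业银行"),
             ("600015.ss", "华夏银行"), ("601229.ss", "上海银行")]),
   ("Petroleum", [("601857.ss", "中国石油"), ("600028.ss", "中国石化"), ("601808.ss", "中海油服")])]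

-- ===== PORT A =====
-- the for-loop over stockList.keys() accumulating the two parallel lists
def pvA_loop (ks : List (String × List (String × String)))
    (codes names : List String) : List String × List String :=
  match ks with
  | [] => (codes, names)
  | (_, pairs) :: rest =>
      pvA_loop rest (codes ++ pairs.map (·.1)) (names ++ pairs.map (·.2))

def getNamebyStock_configfile (No : String) : String :=
  -- try: temp_stockName[temp_stockList.index(No)]  except: sentinel
  match PySem.List.index? (pvA_loop stockListConst [] []).1 No with
  | some i =>
      match PySem.List.pyGet? (pvA_loop stockListConst [] []).2 (Int.ofNat i) with
      | some s => s
      | none => "Unknow_Stock_Name.ss"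
  | none => "Unknow_Stock_Name.ss"

-- ===== PORT B =====
def pvB_pairs (No : String) (pairs : List (String × String)) : Option String :=
  match pairs with
  | [] => none
  | (code, name) :: rest => if code == No then some name else pvB_pairs No rest

def pvB_outer (No : String) (ks : List (String × List (String × String))) : String :=
  match ks with
  | [] => "Unknow_Stock_Name.ss"
  | (_, pairs) :: rest =>
      match pvB_pairs No pairs with
      | some name => name
      | none => pvB_outer No rest

def getNamebyStock_configfile_alt (No : String) : String :=
  pvB_outer No stockListConst

-- ===== PRECONDITION & SPEC =====
def Spec_getNamebyStock_configfile (No : String) (out : String) : Prop := out = getNamebyStock_configfile_alt No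
instance (No : String) (out : String) : Decidable (Spec_getNamebyStock_configfile No out) := by unfold Spec_getNamebyStock_configfile; infer_instance

-- ===== CLAIM (what is proved, stated in full; the proofs are below) =====
def Claim_equal_getNamebyStock_configfile : Prop := ∀ (No : String), Dom_getNamebyStock_configfile No → Spec_getNamebyStock_configfile No (getNamebyStock_configfile No)

-- ===== LEMMAS AND PROOFS =====

-- ===== VERDICT (by name: the statement is the Claim_ definition above) =====
theorem getNamebyStock_configfile_spec : Claim_equal_getNamebyStock_configfile := by
  intro No _
  unfold Spec_getNamebyStock_configfile
  by_cases h1 : No = "601398.ss"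
  · subst h1; rfl
  by_cases h2 : No = "601939.ss"
  · subst h2; rfl
  by_cases h3 : No = "601288.ss"
  · subst h3; rfl
  by_cases h4 : No = "601988.ss"
  · subst h4; rfl
  by_cases h5 : No = "600036.ss"
  · subst h5; rfl
  by_cases h6 : No = "600016.ss"
  · subst h6; rfl
  by_cases h7 : No = "600000.ss"
  · subst h7; rfl
  by_cases h8 : No = "601328.ss"
  · subst h8; rfl
  by_cases h9 : No = "601818.ss"
  · subst h9; rfl
  by_cases h10 : No = "601169.ss"
  · subst h10; rfl
  by_cases h11 : No = "601998.ss"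
  · subst h11; rfl
  by_cases h12 : No = "601166.ss"
  · subst h12; rfl
  by_cases h13 : No = "600015.ss"
  · subst h13; rfl
  by_cases h14 : No = "601229.ss"
  · subst h14; rfl
  by_cases h15 : No = "601857.ss"
  · subst h15; rfl
  by_cases h16 : No = "600028.ss"
  · subst h16; rfl
  by_cases h17 : No = "601808.ss"
  · subst h17; rfl
  unfold getNamebyStock_configfile getNamebyStock_configfile_alt
  have hA : PySem.List.index? (pvA_loop stockListConst [] []).1 No = none := by
    rw [PySem.List.index?_eq_none_iff]
    simp [pvA_loop, stockListConst, h1, h2, h3, h4, h5, h6, h7, h8, h9, h10, h11, h12, h13, h14, h15, h16, h17]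
  rw [hA]
  simp only [pvB_outer, pvB_pairs, stockListConst, beq_iff_eq, Ne.symm h1, Ne.symm h2, Ne.symm h3, Ne.symm h4, Ne.symm h5, Ne.symm h6, Ne.symm h7, Ne.symm h8, Ne.symm h9, Ne.symm h10, Ne.symm h11, Ne.symm h12, Ne.symm h13, Ne.symm h14, Ne.symm h15, Ne.symm h16, Ne.symm h17, if_false]
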